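-- pv_equiv track=rewrite | github.com/adamhb123/cs200_demo_sandbox | test_main.py | _generate_expected
-- ===== SOURCE A (Python) =====
-- from typing import List
--
-- def _generate_expected(inputs: List[int], operations: List[int]) -> List[int]:
--     expected = []
--     for op in operations:
--         if op == 1:
--             expected.append(sum(inputs))
--         elif op == 2:
--             expected.append(min(inputs))
--         elif op == 3:
--             expected.append(max(inputs))
--         elif op == 4:
--             expected.append(None)
--     return expected
-- ===== SOURCE B (Python) =====
-- from typing import List
--
-- def _generate_expected(inputs: List[int], operations: List[int]) -> List[int]:
--
--     results = {1: sum(inputs), 4: None}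
--     if inputs:
--         results[2] = min(inputs)
--         results[3] = max(inputs)
--     return [results[op] for op in operations if op in results]
-- ===== Notes on version B (the rewrite author's own statement) =====
-- stated objective: alternative
-- what changed: B precomputes sum/min/max once into a lookup table and answers each operation by a single dict lookup in one comprehension, instead of A's per-operation branch chain that rescans the input list; not measurably faster on the generated inputs.
import Mathlib
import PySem

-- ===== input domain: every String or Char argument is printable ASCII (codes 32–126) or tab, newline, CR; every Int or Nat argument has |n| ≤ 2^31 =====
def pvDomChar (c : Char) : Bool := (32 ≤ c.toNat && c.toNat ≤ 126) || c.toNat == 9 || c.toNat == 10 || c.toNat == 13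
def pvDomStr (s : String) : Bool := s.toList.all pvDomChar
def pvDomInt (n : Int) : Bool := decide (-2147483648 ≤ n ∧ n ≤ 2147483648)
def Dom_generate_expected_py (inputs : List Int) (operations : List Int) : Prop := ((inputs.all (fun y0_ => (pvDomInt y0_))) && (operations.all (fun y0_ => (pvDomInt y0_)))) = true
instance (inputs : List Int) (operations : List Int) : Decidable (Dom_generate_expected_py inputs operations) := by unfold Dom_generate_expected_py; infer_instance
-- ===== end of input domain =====

-- B precomputes sum/min/max once into a lookup table and answers each operation by dict lookup,
-- instead of A's per-operation branch chain that rescans the inputs.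

-- ===== PORT A =====
def generate_expected_py (inputs : List Int) (operations : List Int) : List (Option Int) :=
  operations.foldl (fun expected op =>
    if op = 1 then expected ++ [some inputs.sum]
    else if op = 2 then expected ++ [PySem.List.min? inputs (fun x => x)]
    else if op = 3 then expected ++ [PySem.List.max? inputs (fun x => x)]
    else if op = 4 then expected ++ [none]
    else expected) []

-- ===== PORT B =====
-- the precomputed results table of Source B
def pvResultsB (inputs : List Int) : PySem.Dict Int (Option Int) :=
  let results := (PySem.Dict.empty.insert 1 (some inputs.sum)).insert 4 none
  if inputs ≠ [] then
    (results.insert 2 (PySem.List.min? inputs (fun x => x))).insert 3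
      (PySem.List.max? inputs (fun x => x))
  else results

def generate_expected_py_alt (inputs : List Int) (operations : List Int) : List (Option Int) :=
  operations.filterMap (fun op => (pvResultsB inputs).get? op)

-- ===== PRECONDITION & SPEC =====
-- Pre_ excludes exactly the inputs where A raises ValueError: min/max of an empty list.
def Pre_generate_expected_py (inputs : List Int) (operations : List Int) : Prop :=
  inputs ≠ [] ∨ ((2 : Int) ∉ operations ∧ (3 : Int) ∉ operations)
instance (inputs : List Int) (operations : List Int) : Decidable (Pre_generate_expected_py inputs operations) := by unfold Pre_generate_expected_py; infer_instance

def pvWitness_generate_expected_py : List Int × List Int := ([3, -1, 4], [1, 2, 3, 4, 5, 1])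

def Spec_generate_expected_py (inputs : List Int) (operations : List Int) (out : List (Option Int)) : Prop := out = generate_expected_py_alt inputs operations
instance (inputs : List Int) (operations : List Int) (out : List (Option Int)) : Decidable (Spec_generate_expected_py inputs operations out) := by unfold Spec_generate_expected_py; infer_instance

-- ===== CLAIM (what is proved, stated in full; the proofs are below) =====
def Claim_equal_generate_expected_py : Prop := ∀ (inputs : List Int) (operations : List Int), Dom_generate_expected_py inputs operations → Pre_generate_expected_py inputs operations → Spec_generate_expected_py inputs operations (generate_expected_py inputs operations)

-- ===== LEMMAS AND PROOFS =====

-- per-operation agreement: A's branch for op contributes exactly the table lookup for op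
lemma pv_step_eq (inputs : List Int) (op : Int)
    (h : inputs ≠ [] ∨ (op ≠ 2 ∧ op ≠ 3)) :
    (if op = 1 then [some inputs.sum]
     else if op = 2 then [PySem.List.min? inputs (fun x => x)]
     else if op = 3 then [PySem.List.max? inputs (fun x => x)]
     else if op = 4 then [(none : Option Int)]
     else []) = ((pvResultsB inputs).get? op).toList := by
  unfold pvResultsB
  by_cases he : inputs = []
  · rcases h with h | ⟨h2, h3⟩
    · exact absurd he h
    · simp only [he, ne_eq, not_true_eq_false, if_false, PySem.Dict.empty]
      split_ifs with h1 h2' h3' h4 <;>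
        simp_all [PySem.Dict.insert, PySem.Dict.get?] <;> omega
  · simp only [he, ne_eq, not_false_eq_true, if_true, PySem.Dict.empty]
    split_ifs with h1 h2' h3' h4 <;>
      simp_all [PySem.Dict.insert, PySem.Dict.get?] <;> omega

lemma pv_foldl_eq (inputs : List Int) (ops : List Int)
    (h : inputs ≠ [] ∨ ((2 : Int) ∉ ops ∧ (3 : Int) ∉ ops)) :
    ∀ acc : List (Option Int),
      ops.foldl (fun expected op =>
        if op = 1 then expected ++ [some inputs.sum]
        else if op = 2 then expected ++ [PySem.List.min? inputs (fun x => x)]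
        else if op = 3 then expected ++ [PySem.List.max? inputs (fun x => x)]
        else if op = 4 then expected ++ [none]
        else expected) acc
      = acc ++ ops.filterMap (fun op => (pvResultsB inputs).get? op) := by
  induction ops with
  | nil => intro acc; simp
  | cons op t ih =>
    intro acc
    have hop : inputs ≠ [] ∨ (op ≠ 2 ∧ op ≠ 3) := by
      rcases h with h | ⟨h2, h3⟩
      · exact Or.inl h
      · exact Or.inr ⟨by simp at h2; exact fun e => h2.1 e.symm, by simp at h3; exact fun e => h3.1 e.symm⟩
    have ht : inputs ≠ [] ∨ ((2 : Int) ∉ t ∧ (3 : Int) ∉ t) := by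
      rcases h with h | ⟨h2, h3⟩
      · exact Or.inl h
      · exact Or.inr ⟨fun m => h2 (List.mem_cons_of_mem _ m), fun m => h3 (List.mem_cons_of_mem _ m)⟩
    have hstep := pv_step_eq inputs op hop
    simp only [List.foldl_cons, List.filterMap_cons]
    cases hg : (pvResultsB inputs).get? op with
    | none =>
      have : (if op = 1 then acc ++ [some inputs.sum]
        else if op = 2 then acc ++ [PySem.List.min? inputs (fun x => x)]
        else if op = 3 then acc ++ [PySem.List.max? inputs (fun x => x)]
        else if op = 4 then acc ++ [none]
        else acc) = acc := by
        split_ifs with h1 h2' h3' h4 <;> simp_all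
      rw [this, ih ht acc]
    | some v =>
      have : (if op = 1 then acc ++ [some inputs.sum]
        else if op = 2 then acc ++ [PySem.List.min? inputs (fun x => x)]
        else if op = 3 then acc ++ [PySem.List.max? inputs (fun x => x)]
        else if op = 4 then acc ++ [none]
        else acc) = acc ++ [v] := by
        split_ifs with h1 h2' h3' h4 <;> simp_all
      rw [this, ih ht (acc ++ [v])]
      simp

-- ===== VERDICT (by name: the statement is the Claim_ definition above) =====
theorem generate_expected_py_spec : Claim_equal_generate_expected_py := by
  intro inputs operations _ hpre
  unfold Spec_generate_expected_py generate_expected_py generate_expected_py_alt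
  simpa using pv_foldl_eq inputs operations hpre []
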